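-- pv_equiv track=rewrite | github.com/waggle-sensor/beehive-server | publishing-tools/utils/data_manipulator/wg_datatool.py | prep_grep
-- ===== SOURCE A (Python) =====
-- def prep_grep(grep_op):
--     expression = []
--     current_op_group = []
--     for i in range(len(grep_op)):
--         if grep_op[i].lower() == 'and':
--             continue
--         elif grep_op[i].lower() == 'or':
--             if current_op_group == []:
--                 continue
--             else:
--                 expression.append(tuple(current_op_group))
--                 current_op_group = []
--         else:
--             current_op_group.append(grep_op[i])
--
--     if current_op_group != []:
--         expression.append(tuple(current_op_group))
--     return expression
-- ===== SOURCE B (Python) =====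
-- from itertools import groupby
--
-- def prep_grep(grep_op):
--     tokens = [t for t in grep_op if t.lower() != 'and']
--     expression = []
--     for is_sep, group in groupby(tokens, key=lambda t: t.lower() == 'or'):
--         if not is_sep:
--             expression.append(tuple(group))
--     return expression
-- ===== Notes on version B (the rewrite author's own statement) =====
-- stated objective: idiomatic
-- what changed: Replaces A's single stateful loop carrying a mutable current-group accumulator with a filter pass dropping 'and' tokens followed by itertools.groupby runs keyed on being an 'or' separator, emitting each non-separator run.
import Mathlib
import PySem

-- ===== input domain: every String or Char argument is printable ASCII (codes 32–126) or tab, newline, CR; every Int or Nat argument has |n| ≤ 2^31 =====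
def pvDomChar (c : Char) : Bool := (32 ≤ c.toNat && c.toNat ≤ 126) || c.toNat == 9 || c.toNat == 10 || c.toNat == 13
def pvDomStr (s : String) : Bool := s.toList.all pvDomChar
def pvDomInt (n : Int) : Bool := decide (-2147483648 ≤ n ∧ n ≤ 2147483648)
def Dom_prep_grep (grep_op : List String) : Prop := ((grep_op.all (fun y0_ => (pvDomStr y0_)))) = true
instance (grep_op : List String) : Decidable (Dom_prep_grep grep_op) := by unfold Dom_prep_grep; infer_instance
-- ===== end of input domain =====

-- B replaces A's stateful accumulator loop by a filter pass plus run-grouping (itertools.groupby); same values, idiomatic decomposition.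

-- ===== PORT A =====
-- A's for-loop over indices, carried state (expression, current_op_group); list append at the tail.
def prep_grep (grep_op : List String) : List (List String) :=
  let st := grep_op.foldl
    (fun (st : List (List String) × List String) t =>
      if PySem.Str.lower t = "and" then st
      else if PySem.Str.lower t = "or" then
        if st.2 = [] then st else (st.1 ++ [st.2], [])
      else (st.1, st.2 ++ [t]))
    ([], [])
  if st.2 ≠ [] then st.1 ++ [st.2] else st.1

-- ===== PORT B =====
-- groupby over the 'and'-filtered tokens: a separator run ('or' tokens) is skipped, a non-separator run is emitted whole.
def pvRuns : List String → List (List String)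
  | [] => []
  | t :: rest =>
    if PySem.Str.lower t = "or" then pvRuns rest
    else (t :: rest.takeWhile (fun s => PySem.Str.lower s ≠ "or"))
           :: pvRuns (rest.dropWhile (fun s => PySem.Str.lower s ≠ "or"))
  termination_by l => l.length
  decreasing_by
  · simp
  · simpa using Nat.lt_succ_of_le (List.length_dropWhile_le _ _)

def prep_grep_alt (grep_op : List String) : List (List String) :=
  pvRuns (grep_op.filter (fun t => PySem.Str.lower t != "and"))

-- ===== PRECONDITION & SPEC =====
def Spec_prep_grep (grep_op : List String) (out : List (List String)) : Prop := out = prep_grep_alt grep_op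
instance (grep_op : List String) (out : List (List String)) : Decidable (Spec_prep_grep grep_op out) := by unfold Spec_prep_grep; infer_instance

-- ===== CLAIM (what is proved, stated in full; the proofs are below) =====
def Claim_equal_prep_grep : Prop := ∀ (grep_op : List String), Dom_prep_grep grep_op → Spec_prep_grep grep_op (prep_grep grep_op)

-- ===== LEMMAS AND PROOFS =====

-- accumulator-style grouping of an 'and'-free token list (proof helper characterising A's loop)
def pvG (cur : List String) : List String → List (List String)
  | [] => if cur = [] then [] else [cur]
  | t :: rest =>
    if PySem.Str.lower t = "or" then
      if cur = [] then pvG [] rest else cur :: pvG [] rest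
    else pvG (cur ++ [t]) rest

theorem pvG_eq_runs (l : List String) (cur : List String) :
    pvG cur l = if cur = [] then pvRuns l
      else (cur ++ l.takeWhile (fun s => PySem.Str.lower s ≠ "or"))
             :: pvRuns (l.dropWhile (fun s => PySem.Str.lower s ≠ "or")) := by
  induction l generalizing cur with
  | nil => by_cases hc : cur = [] <;> simp [pvG, pvRuns, hc]
  | cons t rest ih =>
    by_cases hor : PySem.Str.lower t = "or"
    · by_cases hc : cur = []
      · simp [pvG, hor, hc, pvRuns, ih]
      · simp [pvG, hor, hc, pvRuns, ih]
    · by_cases hc : cur = []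
      · simp [pvG, hor, hc, pvRuns, ih]
      · simp [pvG, hor, hc, List.takeWhile, List.dropWhile, ih,
              List.append_assoc]

theorem pvA_char (xs : List String) :
    ∀ (expr : List (List String)) (cur : List String),
      (let st := xs.foldl
        (fun (st : List (List String) × List String) t =>
          if PySem.Str.lower t = "and" then st
          else if PySem.Str.lower t = "or" then
            if st.2 = [] then st else (st.1 ++ [st.2], [])
          else (st.1, st.2 ++ [t]))
        (expr, cur)
       if st.2 ≠ [] then st.1 ++ [st.2] else st.1)
      = expr ++ pvG cur (xs.filter (fun t => PySem.Str.lower t != "and")) := by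
  induction xs with
  | nil =>
    intro expr cur
    by_cases hc : cur = [] <;> simp [pvG, hc]
  | cons t rest ih =>
    intro expr cur
    by_cases hand : PySem.Str.lower t = "and"
    · simpa [hand] using ih expr cur
    · by_cases hor : PySem.Str.lower t = "or"
      · by_cases hc : cur = []
        · simpa [hand, hor, hc, pvG] using ih expr []
        · simp only [List.foldl_cons, List.filter_cons]
          simp [hor, hc, pvG, ih (expr ++ [cur]) [], List.append_assoc]
      · simp only [List.foldl_cons, List.filter_cons]
        simp [hand, hor, pvG, ih expr (cur ++ [t])]

-- ===== VERDICT (by name: the statement is the Claim_ definition above) =====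
theorem prep_grep_spec : Claim_equal_prep_grep := by
  intro grep_op _
  show prep_grep grep_op = prep_grep_alt grep_op
  have h := pvA_char grep_op [] []
  simpa [prep_grep, prep_grep_alt, pvG_eq_runs] using h
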